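-- pv_equiv track=rewrite | github.com/ChahwanSong/dms-scheduler | app/services/directory.py | make_volume_name_from_path
-- ===== SOURCE A (Python) =====
-- def make_volume_name_from_path(path: str) -> str:
--     """Convert a path into a DNS-compliant volume name."""
--     if path == None:
--         return ""
--
--     name = (
--         path.strip("/")
--         .replace("/", "-")
--         .replace("_", "-")
--         .replace(".", "-")
--         .lower()
--     )
--     name = "".join(c for c in name if c.isalnum() or c == "-")
--     name = name.strip("-")
--     if not name:
--         name = "vol"
--     if not name[0].isalnum():
--         name = "v" + name
--     if not name[-1].isalnum():
--         name = name + "v"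
--     return name
-- ===== SOURCE B (Python) =====
-- def make_volume_name_from_path(path: str) -> str:
--     """Convert a path into a DNS-compliant volume name (single-pass rewrite)."""
--     if path == None:
--         return ""
--     out = []
--     for c in path:
--         if c in "/_.-":
--             out.append("-")
--         elif c.isalnum():
--             out.append(c.lower())
--     name = "".join(out).strip("-")
--     return name if name else "vol"
-- ===== Notes on version B (the rewrite author's own statement) =====
-- stated objective: simpler
-- what changed: A builds the name through a six-stage string pipeline (strip('/'), three chained replace calls, lower(), a filter join, strip('-'), plus two dead end-guards); B produces the same name in one pass over the characters (map each char to '-', its lowercase form, or nothing) followed by a single strip('-') and the empty->'vol' fallback.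
import Mathlib
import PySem

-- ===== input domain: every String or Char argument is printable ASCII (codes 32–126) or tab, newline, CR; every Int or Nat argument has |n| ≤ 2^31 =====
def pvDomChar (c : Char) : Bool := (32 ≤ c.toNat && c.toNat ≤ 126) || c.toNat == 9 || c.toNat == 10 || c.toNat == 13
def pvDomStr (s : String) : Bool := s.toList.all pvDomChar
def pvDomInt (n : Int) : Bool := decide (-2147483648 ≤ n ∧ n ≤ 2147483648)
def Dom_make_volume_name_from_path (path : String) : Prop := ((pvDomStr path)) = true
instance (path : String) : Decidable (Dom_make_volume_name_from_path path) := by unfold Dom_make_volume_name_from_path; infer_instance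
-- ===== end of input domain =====

-- B replaces A's strip/replace/replace/replace/lower/filter pipeline by one pass over the
-- characters (rewrite each char, then one strip('-') and the empty→"vol" fallback); objective:
-- simpler.  (Python A's `path == None` branch is unreachable for a String argument.)

-- ===== PORT A =====
def make_volume_name_from_path (path : String) : String :=
  -- name = path.strip("/").replace("/", "-").replace("_", "-").replace(".", "-").lower()
  let name0 : List Char :=
    PySem.Chars.lower (PySem.Chars.replace (PySem.Chars.replace (PySem.Chars.replace
      (PySem.Chars.stripChars path.toList ['/']) ['/'] ['-']) ['_'] ['-']) ['.'] ['-'])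
  -- name = "".join(c for c in name if c.isalnum() or c == "-")
  let name1 := name0.filter (fun c => PySem.Chars.isalnum c || c == '-')
  -- name = name.strip("-")
  let name2 := PySem.Chars.stripChars name1 ['-']
  -- if not name: name = "vol"
  let name3 := if name2.isEmpty then ['v', 'o', 'l'] else name2
  -- if not name[0].isalnum(): name = "v" + name   (name is nonempty here; name[0] is its head)
  let name4 := if !(PySem.Chars.isalnum (name3.headD ' ')) then 'v' :: name3 else name3
  -- if not name[-1].isalnum(): name = name + "v"  (name[-1] is its last element)
  let name5 := if !(PySem.Chars.isalnum (name4.getLastD ' ')) then name4 ++ ['v'] else name4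
  String.ofList name5

-- ===== PORT B =====
def make_volume_name_from_path_alt (path : String) : String :=
  let out : List Char := path.toList.foldl (fun acc c =>
      if c == '/' || c == '_' || c == '.' || c == '-' then acc ++ ['-']
      else if PySem.Chars.isalnum c then acc ++ [PySem.Chars.lowerChar c]
      else acc) []
  let name := PySem.Chars.stripChars out ['-']
  if name.isEmpty then "vol" else String.ofList name

-- ===== PRECONDITION & SPEC =====
def Spec_make_volume_name_from_path (path : String) (out : String) : Prop := out = make_volume_name_from_path_alt path
instance (path : String) (out : String) : Decidable (Spec_make_volume_name_from_path path out) := by unfold Spec_make_volume_name_from_path; infer_instance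

-- ===== CLAIM (what is proved, stated in full; the proofs are below) =====
def Claim_equal_make_volume_name_from_path : Prop := ∀ (path : String), Dom_make_volume_name_from_path path → Spec_make_volume_name_from_path path (make_volume_name_from_path path)

-- ===== LEMMAS AND PROOFS =====

-- the per-character rewrite B performs
def pvF (c : Char) : List Char :=
  if c == '/' || c == '_' || c == '.' || c == '-' then ['-']
  else if PySem.Chars.isalnum c then [PySem.Chars.lowerChar c]
  else []

theorem pv_char_le (a d : Char) : (a ≤ d) ↔ (a.toNat ≤ d.toNat) := by
  rw [Char.le_def]; exact UInt32.le_iff_toNat_le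

-- single-character replace is a map
theorem pv_go_single (a b : Char) : ∀ (fuel : Nat) (l acc : List Char), l.length ≤ fuel →
    PySem.Chars.replace.go [a] [b] fuel l acc
      = acc.reverse ++ l.map (fun c => if c == a then b else c) := by
  intro fuel
  induction fuel with
  | zero =>
    intro l acc h
    have hl : l = [] := List.length_eq_zero_iff.mp (Nat.le_zero.mp h)
    subst hl
    rw [PySem.Chars.replace.go]
    simp
  | succ n ih =>
    intro l acc h
    cases l with
    | nil =>
      rw [PySem.Chars.replace.go]
      simp
      omega
    | cons c t =>
      rw [PySem.Chars.replace.go]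
      simp only [List.length_cons] at h
      by_cases hc : c = a
      · subst hc
        rw [if_pos (by simp [List.isPrefixOf])]
        simp only [List.length_singleton, List.drop_one, List.tail_cons, List.reverse_singleton,
          List.singleton_append]
        rw [ih t (b :: acc) (by omega)]
        simp
      · rw [if_neg (by simp [List.isPrefixOf]; exact fun h' => hc h'.symm)]
        rw [ih t (c :: acc) (by omega)]
        simp [hc]

theorem pv_replace_single (s : List Char) (a b : Char) :
    PySem.Chars.replace s [a] [b] = s.map (fun c => if c == a then b else c) := by
  unfold PySem.Chars.replace
  rw [if_neg (by simp)]
  rw [pv_go_single a b s.length s [] (le_refl _)]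
  simp

theorem pv_upper_bounds {c : Char} (h : PySem.Chars.isupper c = true) :
    65 ≤ c.toNat ∧ c.toNat ≤ 90 := by
  unfold PySem.Chars.isupper at h
  simp only [Bool.and_eq_true, decide_eq_true_eq, pv_char_le] at h
  exact h

theorem pv_lower_toNat {c : Char} (h : PySem.Chars.isupper c = true) :
    (PySem.Chars.lowerChar c).toNat = c.toNat + 32 := by
  obtain ⟨h1, h2⟩ := pv_upper_bounds h
  unfold PySem.Chars.lowerChar
  rw [if_pos h]
  simp only [Char.toNat_ofNat, Nat.isValidChar]
  rw [if_pos (Or.inl (by omega))]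

-- lowering preserves alphanumericity
theorem pv_isalnum_lower (c : Char) :
    PySem.Chars.isalnum (PySem.Chars.lowerChar c) = PySem.Chars.isalnum c := by
  by_cases h : PySem.Chars.isupper c = true
  · obtain ⟨h1, h2⟩ := pv_upper_bounds h
    have hd := pv_lower_toNat h
    have hc : PySem.Chars.isalnum c = true := by
      simp [PySem.Chars.isalnum, PySem.Chars.isalpha, h]
    rw [hc]
    simp only [PySem.Chars.isalnum, PySem.Chars.isalpha, PySem.Chars.islower,
      PySem.Chars.isupper, PySem.Chars.isdigit, pv_char_le, hd]
    simp
    omega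
  · unfold PySem.Chars.lowerChar
    rw [if_neg h]

theorem pv_lower_ne_dash (c : Char) (hc : (c == '-') = false) :
    (PySem.Chars.lowerChar c == '-') = false := by
  by_cases h : PySem.Chars.isupper c = true
  · have hd := pv_lower_toNat h
    obtain ⟨h1, _⟩ := pv_upper_bounds h
    have : PySem.Chars.lowerChar c ≠ '-' := by
      intro he
      rw [he] at hd
      simp at hd
      omega
    simp [this]
  · unfold PySem.Chars.lowerChar
    rw [if_neg h]
    exact hc

-- A's filter-of-lower-of-substitutions is exactly B's per-character rewrite
theorem pv_pipeline_eq_flatMap (l : List Char) :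
    ((((l.map (fun c => if c == '/' then '-' else c)).map (fun c => if c == '_' then '-' else c)).map
        (fun c => if c == '.' then '-' else c)).map PySem.Chars.lowerChar).filter
      (fun c => PySem.Chars.isalnum c || c == '-') = l.flatMap pvF := by
  induction l with
  | nil => rfl
  | cons c t ih =>
    simp only [List.map_cons, List.flatMap_cons, List.filter_cons]
    rw [ih]
    by_cases h1 : c == '/'
    · rw [eq_of_beq h1]
      simp [pvF, PySem.Chars.lowerChar, PySem.Chars.isupper]
    · by_cases h2 : c == '_'
      · rw [eq_of_beq h2]
        simp [pvF, PySem.Chars.lowerChar, PySem.Chars.isupper]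
      · by_cases h3 : c == '.'
        · rw [eq_of_beq h3]
          simp [pvF, PySem.Chars.lowerChar, PySem.Chars.isupper]
        · by_cases h4 : c == '-'
          · rw [eq_of_beq h4]
            simp [pvF, PySem.Chars.lowerChar, PySem.Chars.isupper]
          · have h1b : (c == '/') = false := by simpa using h1
            have h2b : (c == '_') = false := by simpa using h2
            have h3b : (c == '.') = false := by simpa using h3
            have h4b : (c == '-') = false := by simpa using h4
            simp only [h1b, h2b, h3b, Bool.false_eq_true, if_false]
            rw [pv_lower_ne_dash c h4b, pv_isalnum_lower c]
            have hpv : pvF c = (if PySem.Chars.isalnum c = true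
                then [PySem.Chars.lowerChar c] else []) := by
              unfold pvF
              rw [h1b, h2b, h3b, h4b]
              simp
            rw [hpv]
            by_cases h5 : PySem.Chars.isalnum c = true
            · simp [h5]
            · simp only [Bool.not_eq_true] at h5
              simp [h5]

-- B's loop is a flatMap
theorem pv_foldl_eq_flatMap (l : List Char) : ∀ (acc : List Char),
    l.foldl (fun acc c =>
      if c == '/' || c == '_' || c == '.' || c == '-' then acc ++ ['-']
      else if PySem.Chars.isalnum c then acc ++ [PySem.Chars.lowerChar c]
      else acc) acc = acc ++ l.flatMap pvF := by
  induction l with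
  | nil => simp
  | cons c t ih =>
    intro acc
    simp only [List.foldl_cons, List.flatMap_cons]
    by_cases hc : (c == '/' || c == '_' || c == '.' || c == '-') = true
    · rw [if_pos hc, ih, show pvF c = ['-'] from by unfold pvF; rw [if_pos hc]]
      simp
    · rw [if_neg hc]
      by_cases h5 : PySem.Chars.isalnum c = true
      · rw [if_pos h5, ih, show pvF c = [PySem.Chars.lowerChar c] from by
          unfold pvF; rw [if_neg hc, if_pos h5]]
        simp
      · rw [if_neg h5, ih, show pvF c = [] from by
          unfold pvF; rw [if_neg hc, if_neg h5]]
        simp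

-- strip('-') in terms of dropWhile/rdropWhile
theorem pv_strip_eq (x : List Char) :
    PySem.Chars.stripChars x ['-']
      = List.rdropWhile (fun c => (['-'] : List Char).contains c)
          (List.dropWhile (fun c => (['-'] : List Char).contains c) x) := by
  simp [PySem.Chars.stripChars, List.rdropWhile]

-- stripping '-' ignores '-'s prepended or appended
theorem pv_strip_dash_cons (x : List Char) :
    PySem.Chars.stripChars ('-' :: x) ['-'] = PySem.Chars.stripChars x ['-'] := by
  simp [PySem.Chars.stripChars, List.dropWhile]

theorem pv_strip_dash_append (x : List Char) :
    PySem.Chars.stripChars (x ++ ['-']) ['-'] = PySem.Chars.stripChars x ['-'] := by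
  rw [pv_strip_eq, pv_strip_eq]
  rw [List.dropWhile_append]
  by_cases h : (List.dropWhile (fun c => (['-'] : List Char).contains c) x).isEmpty = true
  · rw [if_pos h]
    rw [List.isEmpty_iff.mp h]
    simp [List.dropWhile, List.rdropWhile]
  · rw [if_neg h]
    rw [List.rdropWhile_concat]
    rw [if_pos (by simp)]

theorem pv_strip_dashes_left : ∀ (l x : List Char), (∀ c ∈ l, c = '-') →
    PySem.Chars.stripChars (l ++ x) ['-'] = PySem.Chars.stripChars x ['-'] := by
  intro l
  induction l with
  | nil => simp
  | cons c t ih =>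
    intro x h
    have hc : c = '-' := h c (by simp)
    subst hc
    rw [List.cons_append, pv_strip_dash_cons, ih x (fun d hd => h d (by simp [hd]))]

theorem pv_strip_dashes_right : ∀ (l x : List Char), (∀ c ∈ l, c = '-') →
    PySem.Chars.stripChars (x ++ l) ['-'] = PySem.Chars.stripChars x ['-'] := by
  intro l
  induction l with
  | nil => simp
  | cons c t ih =>
    intro x h
    have hc : c = '-' := h c (by simp)
    subst hc
    have hx : x ++ '-' :: t = (x ++ ['-']) ++ t := by simp
    rw [hx, ih (x ++ ['-']) (fun d hd => h d (by simp [hd])), pv_strip_dash_append]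

-- stripping the slashes first, then rewriting, changes nothing after the final strip('-')
theorem pv_strip_core (s : List Char) :
    PySem.Chars.stripChars ((PySem.Chars.stripChars s ['/']).flatMap pvF) ['-']
      = PySem.Chars.stripChars (s.flatMap pvF) ['-'] := by
  set q : Char → Bool := fun c => (['/'] : List Char).contains c with hq
  have hsplit1 : s = s.takeWhile q ++ s.dropWhile q := (List.takeWhile_append_dropWhile).symm
  set s1 := s.dropWhile q with hs1
  have hsplit2 : s1 = (List.dropWhile q s1.reverse).reverse ++ (List.takeWhile q s1.reverse).reverse := by
    rw [← List.reverse_append, List.takeWhile_append_dropWhile, List.reverse_reverse]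
  have hmid : PySem.Chars.stripChars s ['/'] = (List.dropWhile q s1.reverse).reverse := by
    simp [PySem.Chars.stripChars, hq, hs1]
  have hA : ∀ c ∈ s.takeWhile q, c = '/' := by
    intro c hc
    simpa [hq] using List.mem_takeWhile_imp hc
  have hB : ∀ c ∈ (List.takeWhile q s1.reverse).reverse, c = '/' := by
    intro c hc
    rw [List.mem_reverse] at hc
    simpa [hq] using List.mem_takeWhile_imp hc
  have hdash : ∀ (l : List Char), (∀ c ∈ l, c = '/') → ∀ c ∈ l.flatMap pvF, c = '-' := by
    intro l hl c hc
    rw [List.mem_flatMap] at hc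
    obtain ⟨a, ha, hca⟩ := hc
    rw [hl a ha] at hca
    simpa [pvF] using hca
  conv_rhs => rw [hsplit1]
  conv_rhs => rw [hsplit2]
  rw [← List.append_assoc, List.flatMap_append, List.flatMap_append]
  rw [List.append_assoc, pv_strip_dashes_left _ _ (hdash _ hA)]
  rw [pv_strip_dashes_right _ _ (hdash _ hB)]
  rw [hmid]

-- every character B emits is alphanumeric or '-'
theorem pv_mem_core (s : List Char) :
    ∀ c ∈ s.flatMap pvF, (PySem.Chars.isalnum c || c == '-') = true := by
  intro c hc
  rw [List.mem_flatMap] at hc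
  obtain ⟨a, _, hca⟩ := hc
  unfold pvF at hca
  split at hca
  · simp at hca; simp [hca]
  · split at hca
    · simp at hca
      subst hca
      rename_i h h5
      simp only [pv_isalnum_lower, Bool.or_eq_true]
      exact Or.inl h5
    · simp at hca

theorem pv_mem_strip (x : List Char) :
    ∀ c ∈ PySem.Chars.stripChars x ['-'], c ∈ x := by
  intro c hc
  rw [pv_strip_eq] at hc
  have h1 := (List.rdropWhile_prefix _ _).sublist.mem hc
  exact (List.dropWhile_suffix _).sublist.mem h1

-- a nonempty strip('-') result starts and ends with a non-'-' character
theorem pv_strip_ends (x : List Char) (hx : PySem.Chars.stripChars x ['-'] ≠ []) :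
    ((PySem.Chars.stripChars x ['-']).headD ' ' == '-') = false ∧
    ((PySem.Chars.stripChars x ['-']).getLastD ' ' == '-') = false := by
  set p : Char → Bool := fun c => (['-'] : List Char).contains c with hp
  rw [pv_strip_eq] at hx ⊢
  set y := List.dropWhile p x with hy
  set z := List.rdropWhile p y with hz
  have hyne : y ≠ [] := by
    intro h
    rw [h] at hz
    simp [List.rdropWhile] at hz
    exact hx hz
  constructor
  · -- head of z = head of y, which dropWhile guarantees is not '-'
    obtain ⟨t, ht⟩ := List.rdropWhile_prefix p y
    rw [← hz] at ht
    have hhead : y.head? = z.head? := by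
      rw [← ht]
      exact List.head?_append_of_ne_nil z hx
    have h1 := List.head?_dropWhile_not p x
    rw [← hy, hhead, List.head?_eq_some_head hx] at h1
    simp only at h1
    rw [List.headD_eq_head?, List.head?_eq_some_head hx, Option.getD_some]
    revert h1
    generalize z.head hx = a
    intro h1
    simp only [hp, List.contains_cons, List.contains_nil, Bool.or_false] at h1
    simp [beq_eq_false_iff_ne] at h1 ⊢
    intro he
    exact h1 he
  · have h2 := List.rdropWhile_last_not p y hx
    rw [List.getLastD_eq_getLast?, List.getLast?_eq_some_getLast hx, Option.getD_some]
    revert h2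
    generalize z.getLast hx = a
    intro h2
    simp only [hp, List.contains_cons, List.contains_nil, Bool.or_false] at h2
    simp [beq_eq_false_iff_ne] at h2 ⊢
    intro he
    exact h2 he

-- ===== VERDICT (by name: the statement is the Claim_ definition above) =====
theorem make_volume_name_from_path_spec : Claim_equal_make_volume_name_from_path := by
  intro path _
  unfold Spec_make_volume_name_from_path make_volume_name_from_path make_volume_name_from_path_alt
  simp only [pv_replace_single, PySem.Chars.lower, pv_pipeline_eq_flatMap,
    pv_foldl_eq_flatMap, List.nil_append, pv_strip_core]
  set N := PySem.Chars.stripChars (path.toList.flatMap pvF) ['-'] with hN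
  by_cases h : N.isEmpty = true
  · rw [if_pos h, if_pos h]
    rfl
  · rw [if_neg h, if_neg h]
    have hne : N ≠ [] := by simpa [List.isEmpty_iff] using h
    have hmem : ∀ c ∈ N, (PySem.Chars.isalnum c || c == '-') = true := by
      intro c hc
      exact pv_mem_core _ c (pv_mem_strip _ c hc)
    obtain ⟨hh, hl⟩ := pv_strip_ends (path.toList.flatMap pvF) (by rw [← hN] at *; exact hne)
    rw [← hN] at hh hl
    have hheadmem : N.headD ' ' ∈ N := by
      rw [List.headD_eq_head?, List.head?_eq_some_head hne, Option.getD_some]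
      exact List.head_mem hne
    have hlastmem : N.getLastD ' ' ∈ N := by
      rw [List.getLastD_eq_getLast?, List.getLast?_eq_some_getLast hne, Option.getD_some]
      exact List.getLast_mem hne
    have hhead : PySem.Chars.isalnum (N.headD ' ') = true := by
      have := hmem _ hheadmem
      rw [hh] at this
      simpa using this
    have hlast : PySem.Chars.isalnum (N.getLastD ' ') = true := by
      have := hmem _ hlastmem
      rw [hl] at this
      simpa using this
    have hhead' : PySem.Chars.isalnum (N.head?.getD ' ') = true := by
      rw [← List.headD_eq_head?]; exact hhead
    have hlast' : PySem.Chars.isalnum (N.getLast?.getD ' ') = true := by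
      rw [← List.getLastD_eq_getLast?]; exact hlast
    rw [if_neg (by simp [hhead', hlast']), if_neg (by simp [hhead'])]
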